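-- pv_equiv track=rewrite | github.com/searsam1/theEdabitProject | Python/Grwj3q6oBfeXxhLq5/code.py | sexy_triplets
-- ===== SOURCE A (Python) =====
-- def is_prime(n):
--     if n == 1:
--         return False
--     return all(n % i != 0 for i in range(2, n))
--
-- def sexy_triplets(low, high):
--     def sex(n):
--
--         triple1 = n
--         triple2 = triple1 + 6
--         triple3 = triple2 + 6
--
--         if is_prime(triple1) and is_prime(triple2) and is_prime(triple3) and not is_prime(triple3 + 6):
--
--             return [triple1, triple2, triple3]
--
--     res = []
--     for i in range(low, high-11):
--         if sex(i):
--             res.append(sex(i))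
--     return res
--
-- res = sexy_triplets(64,88)
-- ===== SOURCE B (Python) =====
-- def sexy_triplets(low, high):
--     # Same value as A, computed differently: is_prime does trial division
--     # bounded by sqrt(n), and the result is built in one comprehension pass.
--     # In A, range(2, n) is empty for n < 2, so every n < 2 except 1 counts
--     # as prime; we keep that rule (one line below).
--     def is_prime(n):
--         if n < 2:
--             return n != 1
--         d = 2
--         while d * d <= n:
--             if n % d == 0:
--                 return False
--             d += 1
--         return True
--
--     return [[i, i + 6, i + 12] for i in range(low, high - 11)
--             if is_prime(i) and is_prime(i + 6) and is_prime(i + 12)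
--             and not is_prime(i + 18)]
-- ===== Notes on version B (the rewrite author's own statement) =====
-- stated objective: alternative
-- what changed: A tests each candidate with trial division over the whole range(2, n) and calls its helper sex(i) twice per hit inside an append loop; B uses a sqrt-bounded trial-division primality test and builds the result in one comprehension pass, evaluating the condition once per candidate.
import Mathlib
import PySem

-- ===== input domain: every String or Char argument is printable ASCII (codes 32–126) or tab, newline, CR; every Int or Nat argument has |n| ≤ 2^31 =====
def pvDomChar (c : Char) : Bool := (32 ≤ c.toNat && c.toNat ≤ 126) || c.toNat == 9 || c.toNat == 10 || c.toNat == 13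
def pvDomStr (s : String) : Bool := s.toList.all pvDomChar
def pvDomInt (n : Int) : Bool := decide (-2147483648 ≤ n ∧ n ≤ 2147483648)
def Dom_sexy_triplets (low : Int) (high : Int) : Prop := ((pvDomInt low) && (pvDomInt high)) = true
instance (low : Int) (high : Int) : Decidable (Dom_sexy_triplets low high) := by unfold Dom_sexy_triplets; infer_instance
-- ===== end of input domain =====

-- B replaces A's full-range trial division by a sqrt-bounded one and the append
-- loop (which calls sex(i) twice per hit) by a single filter-and-map pass;
-- the return value is identical (alternative algorithm).

-- ===== PORT A =====
-- is_prime(n): False for 1, else all(n % i != 0 for i in range(2, n))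
def pvIsPrimeA (n : Int) : Bool :=
  if n = 1 then false
  else (PySem.List.pyRange 2 n 1).all (fun i => PySem.Int.mod n i != 0)

-- sex(n): returns [n, n+6, n+12] or None
def pvSexA (n : Int) : Option (List Int) :=
  if pvIsPrimeA n && pvIsPrimeA (n + 6) && pvIsPrimeA (n + 12) && !pvIsPrimeA (n + 18)
  then some [n, n + 6, n + 12] else none

def sexy_triplets (low : Int) (high : Int) : List (List Int) :=
  (PySem.List.pyRange low (high - 11) 1).foldl
    (fun res i =>
      match pvSexA i with          -- 'if sex(i):' — None falsy, a (nonempty) list truthy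
      | some v => if v.isEmpty then res else res ++ [v]  -- 'res.append(sex(i))'; the second call returns the same list v
      | none => res) []

-- ===== PORT B =====
-- while d*d <= n: if n % d == 0: return False; d += 1   (d = 2, 3, …, so d : Nat)
def pvTrialLoop (n : Int) (d : Nat) : Bool :=
  if h : ((d * d : Nat) : Int) ≤ n then
    if PySem.Int.mod n (d : Int) = 0 then false else pvTrialLoop n (d + 1)
  else true
termination_by n.toNat + 1 - d * d
decreasing_by
  have hn : (d * d : Nat) ≤ n.toNat := by omega
  have hsq : (d + 1) * (d + 1) = d * d + 2 * d + 1 := by ring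
  omega

def pvIsPrimeB (n : Int) : Bool :=
  if n < 2 then n != 1 else pvTrialLoop n 2

def pvCondB (i : Int) : Bool :=
  pvIsPrimeB i && pvIsPrimeB (i + 6) && pvIsPrimeB (i + 12) && !pvIsPrimeB (i + 18)

def sexy_triplets_alt (low : Int) (high : Int) : List (List Int) :=
  ((PySem.List.pyRange low (high - 11) 1).filter pvCondB).map
    (fun i => [i, i + 6, i + 12])

-- ===== PRECONDITION & SPEC =====
def Spec_sexy_triplets (low : Int) (high : Int) (out : List (List Int)) : Prop := out = sexy_triplets_alt low high
instance (low : Int) (high : Int) (out : List (List Int)) : Decidable (Spec_sexy_triplets low high out) := by unfold Spec_sexy_triplets; infer_instance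

-- ===== CLAIM (what is proved, stated in full; the proofs are below) =====
def Claim_equal_sexy_triplets : Prop := ∀ (low : Int) (high : Int), Dom_sexy_triplets low high → Spec_sexy_triplets low high (sexy_triplets low high)

-- ===== LEMMAS AND PROOFS =====

-- A's test says True exactly when n ≠ 1 and no i with 2 ≤ i < n divides n.
theorem pvIsPrimeA_iff (n : Int) :
    pvIsPrimeA n = true ↔ n ≠ 1 ∧ ∀ i : Int, 2 ≤ i → i < n → ¬ i ∣ n := by
  unfold pvIsPrimeA
  split
  · simp_all
  · rw [List.all_eq_true]
    constructor
    · intro h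
      refine ⟨by assumption, fun i h2 hlt hdvd => ?_⟩
      have hm := h i (by rw [PySem.List.mem_pyRange_one]; exact ⟨h2, hlt⟩)
      simp only [bne_iff_ne, ne_eq] at hm
      exact hm ((PySem.Int.mod_eq_zero_iff_dvd n i).mpr hdvd)
    · rintro ⟨-, h⟩ i hi
      rw [PySem.List.mem_pyRange_one] at hi
      simp only [bne_iff_ne, ne_eq]
      intro h0
      exact h i hi.1 hi.2 ((PySem.Int.mod_eq_zero_iff_dvd n i).mp h0)

-- B's loop says True exactly when no d ≥ start with d*d ≤ n divides n.
theorem pvTrialLoop_iff (n : Int) (d : Nat) :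
    pvTrialLoop n d = true ↔
      ∀ e : Nat, d ≤ e → ((e * e : Nat) : Int) ≤ n → ¬ (e : Int) ∣ n := by
  fun_induction pvTrialLoop n d with
  | case1 d h hmod =>
    refine iff_of_false (by simp) ?_
    intro hall
    exact (hall d le_rfl h) ((PySem.Int.mod_eq_zero_iff_dvd n d).mp hmod)
  | case2 d h hmod ih =>
    rw [ih]
    constructor
    · intro hall e he hee
      rcases Nat.lt_or_ge d e with hlt | hge
      · exact hall e hlt hee
      · have : e = d := by omega
        subst this
        intro hdvd
        exact hmod ((PySem.Int.mod_eq_zero_iff_dvd n e).mpr hdvd)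
    · intro hall e he hee
      exact hall e (by omega) hee
  | case3 d h =>
    refine iff_of_true rfl ?_
    intro e he hee
    refine absurd (le_trans ?_ hee) h
    push_cast
    nlinarith

-- For n ≥ 2, checking divisors up to √n is as good as checking all of them.
theorem pvSqrtBound (n : Int) (hn : 2 ≤ n) :
    (∀ i : Int, 2 ≤ i → i < n → ¬ i ∣ n) ↔
      (∀ e : Nat, 2 ≤ e → ((e * e : Nat) : Int) ≤ n → ¬ (e : Int) ∣ n) := by
  constructor
  · intro hall e he hee hdvd
    have he2 : (2 : Int) ≤ (e : Int) := by exact_mod_cast he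
    have hee' : (e : Int) * (e : Int) ≤ n := by push_cast at hee; exact hee
    have hle : (e : Int) ≤ n := le_trans (by nlinarith) hee'
    rcases lt_or_eq_of_le hle with hlt | heq
    · exact hall e he2 hlt hdvd
    · nlinarith
  · intro hall i h2 hlt hdvd
    obtain ⟨c, hc⟩ := hdvd
    have hc2 : 2 ≤ c := by nlinarith
    by_cases hii : i * i ≤ n
    · refine hall i.toNat (by omega) ?_ ?_
      · push_cast
        rw [Int.toNat_of_nonneg (by omega)]
        exact hii
      · rw [Int.toNat_of_nonneg (by omega)]
        exact ⟨c, hc⟩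
    · have hii' : n < i * i := by omega
      have hci : c < i := by nlinarith
      refine hall c.toNat (by omega) ?_ ?_
      · push_cast
        rw [Int.toNat_of_nonneg (by omega)]
        nlinarith
      · rw [Int.toNat_of_nonneg (by omega)]
        exact ⟨i, by linarith [hc]⟩

-- The two primality tests agree on every integer.
theorem primeAB (n : Int) : pvIsPrimeA n = pvIsPrimeB n := by
  rcases lt_or_ge n 2 with h | h
  · unfold pvIsPrimeA pvIsPrimeB
    rw [if_pos h, PySem.List.pyRange_one_eq_nil (by omega)]
    split
    · simp_all
    · simp_all
  · rw [Bool.eq_iff_iff, pvIsPrimeA_iff]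
    unfold pvIsPrimeB
    rw [if_neg (by omega), pvTrialLoop_iff]
    rw [pvSqrtBound n h]
    constructor
    · exact fun hp => hp.2
    · exact fun hp => ⟨by omega, hp⟩

theorem pvSexA_eq (i : Int) :
    pvSexA i = if pvCondB i then some [i, i + 6, i + 12] else none := by
  unfold pvSexA pvCondB
  simp only [primeAB]

theorem sexy_triplets_spec : Claim_equal_sexy_triplets := by
  intro low high _
  unfold Spec_sexy_triplets sexy_triplets sexy_triplets_alt
  have hbody : (fun (res : List (List Int)) (i : Int) =>
      match pvSexA i with
      | some v => if v.isEmpty then res else res ++ [v]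
      | none => res)
      = fun res i => if pvCondB i then res ++ [(fun j => [j, j + 6, j + 12]) i] else res := by
    funext res i
    rw [pvSexA_eq]
    by_cases h : pvCondB i <;> simp [h]
  rw [hbody, PySem.List.foldl_append_if, List.nil_append]
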